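-- pv_equiv track=rewrite | github.com/bhavanachowdary1/Protein-Sequencing | hw6_protein.py | makeAminoAcidLabels
-- ===== SOURCE A (Python) =====
-- def combineProteins(proteinList):
--     combinedlist=[]
--     for i in proteinList:
--         for j in i:
--             combinedlist.append(j)
--     return combinedlist
--
-- def aminoAcidDictionary(aaList):
--     dictionary={}
--     for i in aaList:
--         if i not in dictionary:
--             dictionary[i]=1
--         else:
--             dictionary[i]+=1
--     return dictionary
--
-- def makeAminoAcidLabels(proteinList1, proteinList2):
--     gene=[]
--     lst1=combineProteins(proteinList1)
--     lst2=combineProteins(proteinList2)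
--     dictionary1=aminoAcidDictionary(lst1)
--     dictionary2=aminoAcidDictionary(lst2)
--     for i in dictionary1:
--         if i not in gene:
--             gene.append(i)
--     for j in dictionary2:
--         if j not in gene:
--             gene.append(j)
--     gene.sort()
--     return gene
-- ===== SOURCE B (Python) =====
-- def makeAminoAcidLabels(proteinList1, proteinList2):
--     allaa = sorted(a for plist in (proteinList1, proteinList2)
--                      for protein in plist
--                      for a in protein)
--     labels = []
--     for a in allaa:
--         if not labels or labels[-1] != a:
--             labels.append(a)
--     return labels
-- ===== Notes on version B (the rewrite author's own statement) =====
-- stated objective: faster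
-- what changed: Replaced A's flatten/counting-dict/list-membership-dedup-then-sort pipeline by a sort-then-scan algorithm: sort the full multiset of amino acids once (duplicates included), then remove adjacent duplicates in a single linear pass comparing only labels[-1]; no set, dict or membership test remains.
import Mathlib
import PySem

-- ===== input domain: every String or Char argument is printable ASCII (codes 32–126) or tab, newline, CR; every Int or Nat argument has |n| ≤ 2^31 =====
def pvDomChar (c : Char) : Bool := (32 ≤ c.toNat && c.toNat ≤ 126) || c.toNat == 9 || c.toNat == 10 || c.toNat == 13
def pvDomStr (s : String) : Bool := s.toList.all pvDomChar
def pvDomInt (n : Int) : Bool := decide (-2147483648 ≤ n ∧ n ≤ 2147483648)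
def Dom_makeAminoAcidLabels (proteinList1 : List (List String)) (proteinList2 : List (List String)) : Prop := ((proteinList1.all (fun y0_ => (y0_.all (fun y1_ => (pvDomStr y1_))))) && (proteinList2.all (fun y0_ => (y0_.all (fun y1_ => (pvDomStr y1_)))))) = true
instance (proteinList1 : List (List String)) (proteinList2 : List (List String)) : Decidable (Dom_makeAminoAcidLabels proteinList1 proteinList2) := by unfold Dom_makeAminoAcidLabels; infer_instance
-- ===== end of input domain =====

-- B replaces A's flatten / counting-dict / membership-dedup-then-sort pipeline by
-- sort-then-scan: sort the full multiset once, then drop adjacent duplicates in one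
-- linear pass (objective: faster).

-- ===== PORT A =====
def combineProteins (proteinList : List (List String)) : List String :=
  proteinList.foldl (fun combinedlist i =>
    i.foldl (fun combinedlist j => combinedlist ++ [j]) combinedlist) []

def aminoAcidDictionary (aaList : List String) : PySem.Dict String Int :=
  aaList.foldl (fun dictionary i =>
    if dictionary.contains i = false then dictionary.insert i 1
    else dictionary.insert i (dictionary.getD i 0 + 1)) PySem.Dict.empty

def makeAminoAcidLabels (proteinList1 : List (List String)) (proteinList2 : List (List String)) : List String :=
  let lst1 := combineProteins proteinList1
  let lst2 := combineProteins proteinList2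
  let dictionary1 := aminoAcidDictionary lst1
  let dictionary2 := aminoAcidDictionary lst2
  let gene := dictionary1.keys.foldl (fun gene i =>
    if gene.contains i then gene else gene ++ [i]) []
  let gene := dictionary2.keys.foldl (fun gene j =>
    if gene.contains j then gene else gene ++ [j]) gene
  PySem.List.sorted gene (fun x => x) false

-- ===== PORT B =====
def makeAminoAcidLabels_alt (proteinList1 : List (List String)) (proteinList2 : List (List String)) : List String :=
  -- sorted(a for plist in (proteinList1, proteinList2) for protein in plist for a in protein)
  let allaa := PySem.List.sorted ((proteinList1 ++ proteinList2).flatMap (fun protein => protein)) (fun x => x) false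
  -- adjacent-duplicate scan: append a unless labels is nonempty and labels[-1] == a
  allaa.foldl (fun labels a =>
    if labels = [] ∨ labels.getLast? ≠ some a then labels ++ [a] else labels) []

-- ===== PRECONDITION & SPEC =====
def Spec_makeAminoAcidLabels (proteinList1 : List (List String)) (proteinList2 : List (List String)) (out : List String) : Prop := out = makeAminoAcidLabels_alt proteinList1 proteinList2
instance (proteinList1 : List (List String)) (proteinList2 : List (List String)) (out : List String) : Decidable (Spec_makeAminoAcidLabels proteinList1 proteinList2 out) := by unfold Spec_makeAminoAcidLabels; infer_instance

-- ===== CLAIM (what is proved, stated in full; the proofs are below) =====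
def Claim_equal_makeAminoAcidLabels : Prop := ∀ (proteinList1 : List (List String)) (proteinList2 : List (List String)), Dom_makeAminoAcidLabels proteinList1 proteinList2 → Spec_makeAminoAcidLabels proteinList1 proteinList2 (makeAminoAcidLabels proteinList1 proteinList2)

-- ===== LEMMAS AND PROOFS =====

theorem foldl_append_singleton (l : List String) (acc : List String) :
    l.foldl (fun a j => a ++ [j]) acc = acc ++ l := by
  induction l generalizing acc with
  | nil => simp
  | cons x xs ih => simp [List.foldl_cons, ih]

theorem combineProteins_eq_flatMap (l : List (List String)) :
    combineProteins l = l.flatMap (fun protein => protein) := by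
  unfold combineProteins
  suffices h : ∀ acc : List String,
      l.foldl (fun c i => i.foldl (fun c j => c ++ [j]) c) acc
        = acc ++ l.flatMap (fun protein => protein) by
    simpa using h []
  induction l with
  | nil => intro acc; simp
  | cons x xs ih =>
    intro acc
    rw [List.foldl_cons, foldl_append_singleton, ih, List.flatMap_cons, List.append_assoc]

-- the counting dictionary's keys are the distinct elements in first-occurrence order
theorem keys_aminoAcidDictionary (l : List String) :
    (aminoAcidDictionary l).keys = PySem.Set.ofList l := by
  unfold aminoAcidDictionary
  have hfun : (fun (d : PySem.Dict String Int) i =>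
      if d.contains i = false then d.insert i 1 else d.insert i (d.getD i 0 + 1))
      = (fun (d : PySem.Dict String Int) i =>
        d.insert i (if d.contains i = false then 1 else d.getD i 0 + 1)) := by
    funext d i; by_cases h : d.contains i = false <;> simp [h]
  rw [hfun, PySem.Dict.keys_foldl_insert, PySem.Dict.keys_empty,
    PySem.Set.update_nil_left]

-- A's dedup-append loop is exactly Set.update
theorem gene_loop_eq_update (l : List String) (g : List String) :
    l.foldl (fun gene i => if gene.contains i then gene else gene ++ [i]) g
      = PySem.Set.update g l := by
  rfl

-- the largest element of a strictly increasing list is its last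
theorem le_getLast_of_pairwise_lt (acc : List String) (m : String)
    (hp : acc.Pairwise (· < ·)) (hm : acc.getLast? = some m) :
    ∀ x ∈ acc, x ≤ m := by
  induction acc with
  | nil => simp at hm
  | cons y ys ih =>
    intro x hx
    cases ys with
    | nil =>
      simp at hm hx; simp [hx, hm]
    | cons z zs =>
      rw [List.getLast?_cons_cons] at hm
      rcases List.mem_cons.mp hx with rfl | hx'
      · have hlt := (List.pairwise_cons.mp hp).1
        have hm' : m ∈ z :: zs := List.mem_of_getLast? hm
        exact le_of_lt (hlt m hm')
      · exact ih (List.pairwise_cons.mp hp).2 hm x hx'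

-- invariant of B's adjacent-dedup scan over a (≤)-sorted tail
theorem dedupAdj_invariant (l : List String) :
    ∀ acc : List String, acc.Pairwise (· < ·) → l.Pairwise (· ≤ ·) →
    (∀ x ∈ acc, ∀ y ∈ l, x ≤ y) →
    (l.foldl (fun labels a =>
        if labels = [] ∨ labels.getLast? ≠ some a then labels ++ [a] else labels) acc).Pairwise (· < ·) ∧
    (∀ x, x ∈ l.foldl (fun labels a =>
        if labels = [] ∨ labels.getLast? ≠ some a then labels ++ [a] else labels) acc
      ↔ x ∈ acc ∨ x ∈ l) := by
  induction l with
  | nil => intro acc hacc _ _; simpa using hacc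
  | cons a t ih =>
    intro acc hacc hl hle
    have htail : t.Pairwise (· ≤ ·) := (List.pairwise_cons.mp hl).2
    have hat : ∀ y ∈ t, a ≤ y := (List.pairwise_cons.mp hl).1
    rw [List.foldl_cons]
    by_cases hc : acc = [] ∨ acc.getLast? ≠ some a
    · -- append a
      have hacc' : (acc ++ [a]).Pairwise (· < ·) := by
        rw [List.pairwise_append]
        refine ⟨hacc, List.pairwise_singleton _ _, ?_⟩
        intro x hx a' ha'
        rcases List.mem_singleton.mp ha' with rfl
        have hxa : x ≤ a' := hle x hx a' (List.mem_cons_self)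
        rcases lt_or_eq_of_le hxa with h | heq
        · exact h
        · -- x = a: then acc ≠ [] and last acc = a, contradicting hc
          exfalso
          rcases hc with hnil | hlast
          · simp [hnil] at hx
          · obtain ⟨m, hm⟩ := Option.isSome_iff_exists.mp
              (List.getLast?_isSome.mpr (List.ne_nil_of_mem hx))
            have hxm : x ≤ m := le_getLast_of_pairwise_lt acc m hacc hm x hx
            have hma : m ≤ a' := hle m (List.mem_of_getLast? hm) a' List.mem_cons_self
            exact hlast ((le_antisymm hma (heq ▸ hxm)) ▸ hm)
      have hle' : ∀ x ∈ acc ++ [a], ∀ y ∈ t, x ≤ y := by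
        intro x hx y hy
        rcases List.mem_append.mp hx with h | h
        · exact hle x h y (List.mem_cons_of_mem _ hy)
        · rcases List.mem_singleton.mp h with rfl; exact hat y hy
      have := ih (acc ++ [a]) hacc' htail hle'
      simp only [if_pos hc]
      refine ⟨this.1, ?_⟩
      intro x
      rw [this.2]
      simp only [List.mem_append, List.mem_cons]
      tauto
    · -- skip: last acc = a, so a ∈ acc
      rw [not_or, not_not] at hc
      obtain ⟨hne, hlast⟩ := hc
      have ha_mem : a ∈ acc := by
        have := List.mem_of_getLast? (l := acc) (a := a)
        exact this hlast
      have hle' : ∀ x ∈ acc, ∀ y ∈ t, x ≤ y := by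
        intro x hx y hy; exact hle x hx y (List.mem_cons_of_mem _ hy)
      have := ih acc hacc htail hle'
      rw [if_neg (by simp [hne, hlast])]
      refine ⟨this.1, ?_⟩
      intro x
      rw [this.2]
      constructor
      · rintro (h | h)
        · exact Or.inl h
        · exact Or.inr (List.mem_cons_of_mem _ h)
      · rintro (h | h)
        · exact Or.inl h
        · rcases List.mem_cons.mp h with rfl | h'
          · exact Or.inl ha_mem
          · exact Or.inr h'

theorem makeAminoAcidLabels_eq (proteinList1 proteinList2 : List (List String)) :
    makeAminoAcidLabels proteinList1 proteinList2
      = makeAminoAcidLabels_alt proteinList1 proteinList2 := by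
  unfold makeAminoAcidLabels makeAminoAcidLabels_alt
  simp only [combineProteins_eq_flatMap, keys_aminoAcidDictionary, gene_loop_eq_update]
  set F1 := proteinList1.flatMap (fun protein => protein) with hF1
  set F2 := proteinList2.flatMap (fun protein => protein) with hF2
  have hFb : (proteinList1 ++ proteinList2).flatMap (fun protein => protein) = F1 ++ F2 := by
    simp [hF1, hF2, List.flatMap_append]
  rw [hFb]
  -- B's scan of sorted (F1 ++ F2) yields a strictly increasing list with the members of F1 ++ F2
  have hsorted : (PySem.List.sorted (F1 ++ F2) (fun x => x) false).Pairwise (· ≤ ·) :=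
    PySem.List.sorted_pairwise (F1 ++ F2) (fun x => x)
  have hinv := dedupAdj_invariant (PySem.List.sorted (F1 ++ F2) (fun x => x) false) []
    (List.Pairwise.nil) hsorted (by intro x hx; simp at hx)
  set r := (PySem.List.sorted (F1 ++ F2) (fun x => x) false).foldl
    (fun labels a => if labels = [] ∨ labels.getLast? ≠ some a then labels ++ [a] else labels) [] with hr
  -- A's side names the same list by the uniqueness of strictly sorted orders
  apply PySem.List.sorted_eq_of_perm_of_pairwise_lt
  · rw [List.perm_ext_iff_of_nodup
      (hinv.1.imp (fun h => ne_of_lt h))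
      (PySem.Set.nodup_update _ _
        (PySem.Set.nodup_update _ _ (List.nodup_nil)))]
    intro x
    rw [hinv.2 x]
    simp [PySem.Set.mem_update, PySem.Set.mem_ofList, PySem.List.mem_sorted]
  · exact hinv.1

-- ===== VERDICT (by name: the statement is the Claim_ definition above) =====
theorem makeAminoAcidLabels_spec : Claim_equal_makeAminoAcidLabels := by
  intro p1 p2 _
  exact makeAminoAcidLabels_eq p1 p2
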